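-- pv_equiv track=rewrite | github.com/stevenanderson-git/mtg_pricer | background_pairs.py | parse_versions
-- ===== SOURCE A (Python) =====
-- def parse_versions(card_list):
--     '''Removes duplicates from the list and returns a list with the lowest collector number for each version.'''
--     k = 'name'
--     # create empty dictionary
--     cdict = {}
--     # iterate through list
--     for c in card_list:
--         # if card in dict
--         if c[k] in cdict:
--             cdict[c[k]] = lower_cnum(cdict[c[k]], c)
--         else:
--             cdict[c[k]] = c
--     # return the list of single cards
--     return list(cdict.values())
--
-- def lower_cnum(c1, c2):
--     '''Returns the card with the lower collector number'''
--     k = 'collector_number'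
--     return c1 if c1[k] < c2[k] else c2
-- ===== SOURCE B (Python) =====
-- def parse_versions(card_list):
--     '''Removes duplicates from the list and returns a list with the lowest collector number for each version.'''
--     # pass 1: group all cards by name (groups keep first-appearance order of names)
--     groups = {}
--     for c in card_list:
--         groups.setdefault(c['name'], []).append(c)
--     # pass 2: reduce each group to its lowest-collector-number card
--     # (ties keep the later card, exactly like repeated lower_cnum calls)
--     result = []
--     for g in groups.values():
--         best = g[0]
--         for c in g[1:]:
--             best = best if best['collector_number'] < c['collector_number'] else c
--         result.append(best)
--     return result
-- ===== Notes on version B (the rewrite author's own statement) =====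
-- stated objective: alternative
-- what changed: A keeps one running best card per name and updates it inside a single loop; B first collects the complete group of cards for each name (setdefault/append) and then, in a separate pass over the groups, reduces each group to its minimum with a left fold, preserving A's keep-the-last tie rule and first-appearance output order.
import Mathlib
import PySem

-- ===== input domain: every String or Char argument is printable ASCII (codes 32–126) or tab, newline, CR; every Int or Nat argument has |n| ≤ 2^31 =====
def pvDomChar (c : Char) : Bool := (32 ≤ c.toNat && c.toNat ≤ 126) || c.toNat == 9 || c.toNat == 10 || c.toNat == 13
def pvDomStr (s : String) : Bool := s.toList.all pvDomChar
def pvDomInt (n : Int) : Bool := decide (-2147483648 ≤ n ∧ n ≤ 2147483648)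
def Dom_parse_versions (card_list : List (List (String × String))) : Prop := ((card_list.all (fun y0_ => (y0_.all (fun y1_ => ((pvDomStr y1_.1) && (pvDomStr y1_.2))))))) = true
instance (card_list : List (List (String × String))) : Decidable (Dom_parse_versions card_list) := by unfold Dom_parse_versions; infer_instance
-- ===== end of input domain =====

-- B groups the cards by name first and reduces each group afterwards, instead of A's
-- running one-best-card-per-name update; same cost, proved to return the same list.

-- c[k] on a card (a Python dict, modelled as an association list, first match); the ""
-- default is never reached on inputs satisfying Pre_parse_versions (key present there).
def pvCGet (c : List (String × String)) (k : String) : String :=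
  ((c.find? (fun p => p.1 == k)).map (fun p => p.2)).getD ""

-- ===== PORT A =====
def lower_cnum (c1 c2 : List (String × String)) : List (String × String) :=
  if pvCGet c1 "collector_number" < pvCGet c2 "collector_number" then c1 else c2

def parse_versions (card_list : List (List (String × String))) : List (List (String × String)) :=
  (card_list.foldl (fun cdict c =>
      if cdict.contains (pvCGet c "name") then
        cdict.insert (pvCGet c "name") (lower_cnum ((cdict.get? (pvCGet c "name")).getD []) c)
      else
        cdict.insert (pvCGet c "name") c)
    PySem.Dict.empty).values

-- ===== PORT B =====
-- the inner reduction loop of Source B: best = g[0]; for c in g[1:]: …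
-- (g[0]/g[1:] are ported as headD []/tail: every group Source B builds is nonempty)
def pvBest (g : List (List (String × String))) : List (String × String) :=
  g.tail.foldl
    (fun best c =>
      if pvCGet best "collector_number" < pvCGet c "collector_number" then best else c)
    (g.headD [])

def parse_versions_alt (card_list : List (List (String × String))) : List (List (String × String)) :=
  ((card_list.foldl (fun groups c => groups.modify (pvCGet c "name") [] (fun l => l ++ [c]))
      PySem.Dict.empty).values).foldl
    (fun result g => result ++ [pvBest g]) []

-- ===== PRECONDITION & SPEC =====
-- Pre_ excludes exactly the inputs where the Python A raises KeyError: a card without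
-- a 'name' key, or a card whose name occurs more than once but which lacks 'collector_number'.
def Pre_parse_versions (card_list : List (List (String × String))) : Prop :=
  (card_list.all (fun c =>
      (c.any (fun p => p.1 == "name")) &&
      (decide (card_list.countP (fun c' => pvCGet c' "name" == pvCGet c "name") ≤ 1) ||
        c.any (fun p => p.1 == "collector_number")))) = true
instance (card_list : List (List (String × String))) : Decidable (Pre_parse_versions card_list) := by
  unfold Pre_parse_versions; infer_instance

def pvWitness_parse_versions : (List (List (String × String))) :=
  [[("name", "a"), ("collector_number", "2")], [("name", "a"), ("collector_number", "1")],
   [("name", "b")]]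

def Spec_parse_versions (card_list : List (List (String × String))) (out : List (List (String × String))) : Prop := out = parse_versions_alt card_list
instance (card_list : List (List (String × String))) (out : List (List (String × String))) : Decidable (Spec_parse_versions card_list out) := by unfold Spec_parse_versions; infer_instance

-- ===== CLAIM (what is proved, stated in full; the proofs are below) =====
def Claim_equal_parse_versions : Prop := ∀ (card_list : List (List (String × String))), Dom_parse_versions card_list → Pre_parse_versions card_list → Spec_parse_versions card_list (parse_versions card_list)

-- ===== LEMMAS AND PROOFS =====

-- A's loop step and B's grouping step, named for the proofs
def pvStepA (d : PySem.Dict String (List (String × String))) (c : List (String × String)) :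
    PySem.Dict String (List (String × String)) :=
  if d.contains (pvCGet c "name") then
    d.insert (pvCGet c "name") (lower_cnum ((d.get? (pvCGet c "name")).getD []) c)
  else
    d.insert (pvCGet c "name") c

def pvStepB (g : PySem.Dict String (List (List (String × String)))) (c : List (String × String)) :
    PySem.Dict String (List (List (String × String))) :=
  g.modify (pvCGet c "name") [] (fun l => l ++ [c])

-- reducing each group with pvBest, applied to the items of B's group dict
def pvMapv (G : List (String × List (List (String × String)))) :
    List (String × List (String × String)) :=
  G.map (fun p => (p.1, pvBest p.2))

theorem pvBest_append (l : List (List (String × String))) (c : List (String × String))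
    (hl : l ≠ []) : pvBest (l ++ [c]) = lower_cnum (pvBest l) c := by
  obtain ⟨a, t, rfl⟩ := List.exists_cons_of_ne_nil hl
  simp [pvBest, lower_cnum, List.foldl_append]

theorem pvStep_comm (G : List (String × List (List (String × String))))
    (c : List (String × String)) (hG : ∀ p ∈ G, p.2 ≠ []) :
    pvStepA ⟨pvMapv G⟩ c = ⟨pvMapv (pvStepB ⟨G⟩ c).items⟩ := by
  have hcont : (PySem.Dict.mk (pvMapv G)).contains (pvCGet c "name")
      = (PySem.Dict.mk G).contains (pvCGet c "name") := by
    simp [PySem.Dict.contains, pvMapv, List.any_map, Function.comp_def]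
  by_cases h : (PySem.Dict.mk G).contains (pvCGet c "name") = true
  · -- the name is already a key: both sides replace the entry in place
    have hsome : (G.find? (fun p => p.1 == pvCGet c "name")).isSome := by
      rw [List.find?_isSome]
      simpa [PySem.Dict.contains, List.any_eq_true] using h
    obtain ⟨q, hq⟩ := Option.isSome_iff_exists.mp hsome
    have hqne : q.2 ≠ [] := hG q (List.mem_of_find?_eq_some hq)
    have hgetA : (PySem.Dict.mk (pvMapv G)).get? (pvCGet c "name") = some (pvBest q.2) := by
      simp [PySem.Dict.get?, pvMapv, List.find?_map, Function.comp_def, hq]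
    have hgetB : (PySem.Dict.mk G).getD (pvCGet c "name") [] = q.2 := by
      simp [PySem.Dict.getD, PySem.Dict.get?, hq]
    rw [pvStepA, pvStepB, PySem.Dict.modify, if_pos (show _ = true by rw [hcont]; exact h),
      hgetA, hgetB, PySem.Dict.insert, PySem.Dict.insert, if_pos (by rw [hcont]; exact h),
      if_pos h]
    apply congrArg PySem.Dict.mk
    simp only [pvMapv, List.map_map]
    refine List.map_congr_left (fun p hp => ?_)
    by_cases hpk : p.1 = pvCGet c "name"
    · simp [hpk, pvBest_append q.2 c hqne]
    · simp [hpk]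
  · -- fresh name: both sides append a new entry
    have hany : (G.any (fun p => p.1 == pvCGet c "name")) = false := by
      cases hx : G.any (fun p => p.1 == pvCGet c "name") with
      | false => rfl
      | true => exact absurd (show (PySem.Dict.mk G).contains (pvCGet c "name") = true from hx) h
    have hfind : G.find? (fun p => p.1 == pvCGet c "name") = none :=
      List.find?_eq_none.mpr (fun p hp => by
        have := List.any_eq_false.mp hany p hp; simpa using this)
    have hgetB : (PySem.Dict.mk G).getD (pvCGet c "name") [] = [] := by
      simp [PySem.Dict.getD, PySem.Dict.get?, hfind]
    rw [pvStepA, pvStepB, PySem.Dict.modify, hgetB, if_neg (by rw [hcont]; exact h),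
      PySem.Dict.insert, PySem.Dict.insert, if_neg (by rw [hcont]; exact h), if_neg h]
    apply congrArg PySem.Dict.mk
    simp [pvMapv, pvBest]

theorem pvStepB_inv (G : List (String × List (List (String × String))))
    (c : List (String × String)) (hG : ∀ p ∈ G, p.2 ≠ []) :
    ∀ p ∈ (pvStepB ⟨G⟩ c).items, p.2 ≠ [] := by
  intro p hp
  simp only [pvStepB, PySem.Dict.modify, PySem.Dict.insert] at hp
  split at hp
  · simp only [List.mem_map] at hp
    obtain ⟨q, hqmem, rfl⟩ := hp
    split
    · simp
    · exact hG q hqmem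
  · simp only [List.mem_append, List.mem_singleton] at hp
    rcases hp with hp | rfl
    · exact hG p hp
    · simp

theorem pvFold_comm (cs : List (List (String × String))) :
    ∀ (G : List (String × List (List (String × String)))), (∀ p ∈ G, p.2 ≠ []) →
    cs.foldl pvStepA ⟨pvMapv G⟩ = ⟨pvMapv (cs.foldl pvStepB ⟨G⟩).items⟩ := by
  induction cs with
  | nil => intro G hG; simp
  | cons c cs ih =>
    intro G hG
    rw [List.foldl_cons, pvStep_comm G c hG, List.foldl_cons,
      ih (pvStepB ⟨G⟩ c).items (pvStepB_inv G c hG)]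

theorem pvFoldAppend (l : List (List (List (String × String))))
    (acc : List (List (String × String))) :
    l.foldl (fun result g => result ++ [pvBest g]) acc = acc ++ l.map pvBest := by
  induction l generalizing acc with
  | nil => simp
  | cons g l ih => simp [ih]

theorem parse_versions_spec : Claim_equal_parse_versions := by
  intro card_list _ _
  unfold Spec_parse_versions parse_versions parse_versions_alt
  have h := pvFold_comm card_list [] (by simp)
  simp only [pvMapv, List.map_nil] at h
  show (card_list.foldl pvStepA ⟨[]⟩).values = _
  rw [h, pvFoldAppend]
  simp only [PySem.Dict.values, List.map_map, Function.comp_def, List.nil_append]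
  rfl
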